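-- pv_equiv track=rewrite | github.com/berkantay/polar-cli | src/polar_cli/commands/files.py | _compute_upload_parts
-- ===== SOURCE A (Python) =====
-- CHUNK_SIZE = 5 * 1024 * 1024  # 5MB chunks for S3 multipart upload
--
-- def _compute_upload_parts(size: int) -> list[dict[str, object]]:
--     """Compute S3 multipart upload parts for a file."""
--     parts = []
--     chunk_number = 1
--     remaining = size
--     chunk_start = 0
--
--     while remaining > 0:
--         chunk_size = min(CHUNK_SIZE, remaining)
--         parts.append({
--             "number": chunk_number,
--             "chunk_start": chunk_start,
--             "chunk_end": chunk_start + chunk_size,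
--         })
--         chunk_number += 1
--         chunk_start += chunk_size
--         remaining -= chunk_size
--
--     return parts
-- ===== SOURCE B (Python) =====
-- CHUNK_SIZE = 5 * 1024 * 1024  # 5MB chunks for S3 multipart upload
--
-- def _compute_upload_parts(size: int) -> list[dict[str, object]]:
--     """Compute S3 multipart upload parts for a file (closed-form by index)."""
--     n = (size + CHUNK_SIZE - 1) // CHUNK_SIZE
--     return [
--         {
--             "number": i + 1,
--             "chunk_start": i * CHUNK_SIZE,
--             "chunk_end": min((i + 1) * CHUNK_SIZE, size),
--         }
--         for i in range(n)
--     ]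
-- ===== Notes on version B (the rewrite author's own statement) =====
-- stated objective: alternative
-- what changed: Replaced A's while-loop threading three running accumulators (chunk_number, chunk_start, remaining) with an up-front ceiling-division part count and a closed-form comprehension where each part is computed solely from its index i and size.
import Mathlib
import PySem

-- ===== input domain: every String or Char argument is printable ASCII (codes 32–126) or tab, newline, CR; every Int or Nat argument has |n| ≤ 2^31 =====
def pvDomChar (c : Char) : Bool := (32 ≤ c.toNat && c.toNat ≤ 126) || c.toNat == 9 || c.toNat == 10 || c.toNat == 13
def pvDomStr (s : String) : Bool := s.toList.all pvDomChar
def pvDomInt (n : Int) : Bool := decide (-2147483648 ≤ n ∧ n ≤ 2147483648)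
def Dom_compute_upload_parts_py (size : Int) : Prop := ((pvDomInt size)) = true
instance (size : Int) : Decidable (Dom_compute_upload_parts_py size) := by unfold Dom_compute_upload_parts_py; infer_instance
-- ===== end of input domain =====

-- B replaces A's accumulator-threaded while-loop by an up-front part count and closed-form
-- per-index arithmetic (objective: alternative decomposition; same O(n) cost).

-- ===== PORT A =====
-- A's while-loop: state (chunk_number, chunk_start, remaining), one part appended per iteration.
def computeLoopA (num start rem : Int) : List (List (String × Int)) :=
  if h : rem > 0 then
    [("number", num), ("chunk_start", start),
     ("chunk_end", start + min (5242880 : Int) rem)] ::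
      computeLoopA (num + 1) (start + min (5242880 : Int) rem)
        (rem - min (5242880 : Int) rem)
  else []
termination_by rem.toNat
decreasing_by omega

def compute_upload_parts_py (size : Int) : List (List (String × Int)) :=
  computeLoopA 1 0 size

-- ===== PORT B =====
def compute_upload_parts_py_alt (size : Int) : List (List (String × Int)) :=
  let n := PySem.Int.floordiv (size + 5242880 - 1) 5242880
  (PySem.List.pyRange 0 n 1).map (fun i =>
    [("number", i + 1), ("chunk_start", i * 5242880),
     ("chunk_end", min ((i + 1) * 5242880) size)])

-- ===== PRECONDITION & SPEC =====
def Spec_compute_upload_parts_py (size : Int) (out : List (List (String × Int))) : Prop := out = compute_upload_parts_py_alt size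
instance (size : Int) (out : List (List (String × Int))) : Decidable (Spec_compute_upload_parts_py size out) := by unfold Spec_compute_upload_parts_py; infer_instance

-- ===== CLAIM (what is proved, stated in full; the proofs are below) =====
def Claim_equal_compute_upload_parts_py : Prop := ∀ (size : Int), Dom_compute_upload_parts_py size → Spec_compute_upload_parts_py size (compute_upload_parts_py size)

-- ===== LEMMAS AND PROOFS =====

-- number of parts for a remaining byte count
def nparts (rem : Int) : Nat := (PySem.Int.floordiv (rem + 5242880 - 1) 5242880).toNat

lemma nparts_nonpos {rem : Int} (h : rem ≤ 0) : nparts rem = 0 := by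
  unfold nparts
  have h1 : PySem.Int.floordiv (rem + 5242880 - 1) 5242880 < 1 := by
    rw [PySem.Int.floordiv_lt_iff_lt_mul (by norm_num)]; omega
  omega

lemma nparts_small {rem : Int} (h0 : 0 < rem) (h1 : rem ≤ 5242880) : nparts rem = 1 := by
  unfold nparts
  have : PySem.Int.floordiv (rem + 5242880 - 1) 5242880 = 1 := by
    rw [PySem.Int.floordiv_eq_iff_of_pos (by norm_num)]; omega
  rw [this]; rfl

lemma nparts_step {rem : Int} (h : 5242880 < rem) :
    nparts rem = nparts (rem - 5242880) + 1 := by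
  unfold nparts
  have e1 : rem + 5242880 - 1 = (rem - 1) + 1 * 5242880 := by ring
  have e2 : rem - 5242880 + 5242880 - 1 = rem - 1 := by ring
  rw [e1, e2, PySem.Int.floordiv_eq_ediv_of_pos (by norm_num),
    PySem.Int.floordiv_eq_ediv_of_pos (by norm_num),
    Int.add_mul_ediv_right _ _ (by norm_num : (5242880:Int) ≠ 0)]
  have : 1 ≤ (rem - 1) / 5242880 := by
    rw [Int.le_ediv_iff_mul_le (by norm_num)]; omega
  omega

-- the loop of A computes the closed-form list of B, in a generalized state
lemma loop_closed : ∀ (n : Nat) (rem num start : Int), rem ≤ (n : Int) →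
    computeLoopA num start rem =
      (List.range (nparts rem)).map (fun (k : Nat) =>
        [("number", num + (k : Int)), ("chunk_start", start + (k : Int) * 5242880),
         ("chunk_end", min (start + ((k : Int) + 1) * 5242880) (start + rem))]) := by
  intro n
  induction n with
  | zero =>
    intro rem num start hle
    have h : ¬ rem > 0 := by omega
    rw [computeLoopA.eq_def, dif_neg h, nparts_nonpos (by omega)]
    simp
  | succ n ih =>
    intro rem num start hle
    by_cases h : rem > 0
    · rw [computeLoopA.eq_def, dif_pos h]
      by_cases hc : rem ≤ 5242880
      · -- last chunk
        have hm : min (5242880 : Int) rem = rem := by omega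
        rw [hm, nparts_small h hc]
        rw [computeLoopA.eq_def, dif_neg (by omega : ¬ (rem - rem) > 0)]
        simp [List.range_succ]
        omega
      · -- full chunk, recurse
        have hm : min (5242880 : Int) rem = 5242880 := by omega
        have hle2 : rem - 5242880 ≤ (n : Int) := by push_cast at hle ⊢; omega
        have hrec := ih (rem - 5242880) (num + 1) (start + 5242880) hle2
        have hstep : (5242880 : Int) < rem := by omega
        rw [hm]
        conv_rhs => rw [nparts_step hstep, List.range_succ_eq_map]
        rw [List.map_cons, List.map_map, hrec]
        congr 1
        · simp only [List.cons.injEq, Prod.mk.injEq, Nat.cast_zero, true_and, and_true]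
          push_cast
          omega
        · apply List.map_congr_left
          intro k _
          simp only [Function.comp, List.cons.injEq, Prod.mk.injEq, true_and, and_true]
          push_cast
          omega
    · rw [computeLoopA.eq_def, dif_neg h, nparts_nonpos (by omega)]
      simp

-- ===== VERDICT (by name: the statement is the Claim_ definition above) =====
theorem compute_upload_parts_py_spec : Claim_equal_compute_upload_parts_py := by
  intro size _
  simp only [Spec_compute_upload_parts_py, compute_upload_parts_py,
    compute_upload_parts_py_alt]
  rw [loop_closed size.toNat size 1 0 (by omega), PySem.List.pyRange_one]
  simp only [sub_zero]
  have hn : (PySem.Int.floordiv (size + 5242880 - 1) 5242880).toNat = nparts size := rfl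
  rw [hn, List.map_map]
  apply List.map_congr_left
  intro k _
  simp only [Function.comp, List.cons.injEq, Prod.mk.injEq, true_and, and_true]
  omega
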